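-- pv_equiv track=rewrite | github.com/katimlam/River-Tests | River_Test_7_Four_Jealous_Husbands.py | check_if_ok
-- ===== SOURCE A (Python) =====
-- def last_num(str):
--     return str[-1]
--
-- def check_if_ok(new_start, new_end, new_middle):
--     for wife in new_start:
--         if "Wife" in wife:
--             for husband in new_start:
--                 if "Husband" in husband and last_num(husband)==last_num(wife):
--                     break
--             else:
--                 for other_husband in new_start:
--                     if "Husband" in other_husband:
--                         return False
--     for wife in new_end:
--         if "Wife" in wife:
--             for husband in new_end:
--                 if "Husband" in husband and last_num(husband)==last_num(wife):
--                     break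
--             else:
--                 for other_husband in new_end:
--                     if "Husband" in other_husband:
--                         return False
--
--     for wife in new_middle:
--         if "Wife" in wife:
--             for husband in new_middle:
--                 if "Husband" in husband and last_num(husband)==last_num(wife):
--                     break
--             else:
--                 for other_husband in new_middle:
--                     if "Husband" in other_husband:
--                         return False
--     return True
-- ===== SOURCE B (Python) =====
-- def check_if_ok(new_start, new_end, new_middle):
--     for group in (new_start, new_end, new_middle):
--         husband_nums = {s[-1] for s in group if "Husband" in s}
--         wife_nums = {s[-1] for s in group if "Wife" in s}
--         if husband_nums and not wife_nums <= husband_nums: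
--             return False
--     return True
-- ===== Notes on version B (the rewrite author's own statement) =====
-- stated objective: simpler
-- what changed: Per group, B builds two sets of trailing number characters (husbands' and wives') once and replaces A's per-wife nested scans and duplicated for/else/break logic with a single subset test per group.
import Mathlib
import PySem

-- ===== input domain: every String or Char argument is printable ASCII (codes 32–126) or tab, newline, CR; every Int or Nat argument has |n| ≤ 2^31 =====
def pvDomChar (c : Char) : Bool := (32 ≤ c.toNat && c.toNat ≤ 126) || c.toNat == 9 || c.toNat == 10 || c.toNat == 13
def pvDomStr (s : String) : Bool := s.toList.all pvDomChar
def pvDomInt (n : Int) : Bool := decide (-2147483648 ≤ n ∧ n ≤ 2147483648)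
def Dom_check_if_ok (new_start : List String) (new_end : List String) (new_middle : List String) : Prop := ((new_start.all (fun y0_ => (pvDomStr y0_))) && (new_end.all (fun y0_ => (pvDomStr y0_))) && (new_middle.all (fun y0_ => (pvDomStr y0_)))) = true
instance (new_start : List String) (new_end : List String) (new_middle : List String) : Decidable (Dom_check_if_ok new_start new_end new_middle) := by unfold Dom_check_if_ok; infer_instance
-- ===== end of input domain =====

-- B is simpler: per group it builds the husbands' and wives' trailing-character sets once and uses one subset test instead of A's per-wife nested scans.
-- ===== PORT A =====
-- str[-1]; Option models Python's IndexError on "" (never reached: only called on strings containing "Wife"/"Husband")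
def last_num (s : String) : Option Char := PySem.Str.pyGet? s (-1)

-- A's wife loop over one group: for each wife, inner for/else scan for a matching husband,
-- else scan for any husband (return False at the first one found).
def aLoop (group : List String) : List String → Bool
  | [] => true
  | w :: ws =>
    if PySem.Str.isIn "Wife" w then
      if group.any (fun h => PySem.Str.isIn "Husband" h && (last_num h == last_num w)) then
        aLoop group ws
      else if group.any (fun h => PySem.Str.isIn "Husband" h) then
        false
      else
        aLoop group ws
    else
      aLoop group ws

def check_if_ok (new_start : List String) (new_end : List String) (new_middle : List String) : Bool :=
  aLoop new_start new_start && (aLoop new_end new_end && aLoop new_middle new_middle)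

-- ===== PORT B =====
-- {s[-1] for s in group if tag in s}; filterMap drops the impossible none (tag in s forces s nonempty)
def tagNums (tag : String) (group : List String) : PySem.Set Char :=
  PySem.Set.ofList (group.filterMap (fun s =>
    if PySem.Str.isIn tag s then PySem.Str.pyGet? s (-1) else none))

def groupOK (group : List String) : Bool :=
  let husband_nums := tagNums "Husband" group
  let wife_nums := tagNums "Wife" group
  !(!husband_nums.isEmpty && !(PySem.Set.issubset wife_nums husband_nums))

def check_if_ok_alt (new_start : List String) (new_end : List String) (new_middle : List String) : Bool :=
  [new_start, new_end, new_middle].all groupOK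

-- ===== PRECONDITION & SPEC =====
def Spec_check_if_ok (new_start : List String) (new_end : List String) (new_middle : List String) (out : Bool) : Prop := out = check_if_ok_alt new_start new_end new_middle
instance (new_start : List String) (new_end : List String) (new_middle : List String) (out : Bool) : Decidable (Spec_check_if_ok new_start new_end new_middle out) := by unfold Spec_check_if_ok; infer_instance

-- ===== CLAIM (what is proved, stated in full; the proofs are below) =====
def Claim_equal_check_if_ok : Prop := ∀ (new_start : List String) (new_end : List String) (new_middle : List String), Dom_check_if_ok new_start new_end new_middle → Spec_check_if_ok new_start new_end new_middle (check_if_ok new_start new_end new_middle)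

-- ===== LEMMAS AND PROOFS =====

lemma last_num_eq (s : String) : last_num s = s.toList.getLast? := by
  simp [last_num, PySem.List.pyGet?_neg_one]

lemma last_num_isSome_of_isIn {tag s : String} (htag : tag.toList ≠ []) (h : PySem.Str.isIn tag s = true) : ∃ c, last_num s = some c := by
  rw [PySem.Str.isIn_iff_infix] at h
  have hne : s.toList ≠ [] := fun hs => htag (List.eq_nil_of_infix_nil (hs ▸ h))
  rw [last_num_eq]
  exact Option.isSome_iff_exists.mp (List.getLast?_isSome.mpr hne)

lemma aLoop_eq_all (g l : List String) :
    aLoop g l = l.all (fun w =>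
      !(PySem.Str.isIn "Wife" w) ||
      (g.any (fun h => PySem.Str.isIn "Husband" h && (last_num h == last_num w)) ||
       !(g.any (fun h => PySem.Str.isIn "Husband" h)))) := by
  induction l with
  | nil => simp [aLoop]
  | cons w ws ih => simp only [aLoop, List.all_cons]; split_ifs <;> simp_all

lemma mem_tagNums {tag : String} {g : List String} {c : Char} :
    c ∈ tagNums tag g ↔ ∃ s ∈ g, PySem.Str.isIn tag s = true ∧ last_num s = some c := by
  simp only [tagNums, PySem.Set.mem_ofList, List.mem_filterMap, last_num]
  constructor
  · rintro ⟨s, hs, hf⟩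
    by_cases h : PySem.Str.isIn tag s = true
    · refine ⟨s, hs, h, ?_⟩
      rw [if_pos h] at hf
      exact hf
    · rw [if_neg h] at hf; cases hf
  · rintro ⟨s, hs, h, hlast⟩
    exact ⟨s, hs, by rw [if_pos h]; exact hlast⟩

lemma tagNums_isEmpty_iff {tag : String} {g : List String} (htag : tag.toList ≠ []) :
    (tagNums tag g).isEmpty = true ↔ g.any (fun s => PySem.Str.isIn tag s) = false := by
  rw [List.isEmpty_iff, List.eq_nil_iff_forall_not_mem, List.any_eq_false]
  constructor
  · intro h s hs hIn
    obtain ⟨c, hc⟩ := last_num_isSome_of_isIn htag hIn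
    exact h c (mem_tagNums.mpr ⟨s, hs, hIn, hc⟩)
  · intro h c hc
    obtain ⟨s, hs, hIn, -⟩ := mem_tagNums.mp hc
    exact h s hs hIn

lemma group_eq (g : List String) : aLoop g g = groupOK g := by
  rw [aLoop_eq_all]
  simp only [groupOK]
  cases hE : (tagNums "Husband" g).isEmpty with
  | true =>
    have hH : g.any (fun s => PySem.Str.isIn "Husband" s) = false :=
      (tagNums_isEmpty_iff (by decide)).mp hE
    simp only [Bool.not_true, Bool.false_and, Bool.not_false]
    rw [List.all_eq_true]
    intro w hw
    rw [hH]
    simp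
  | false =>
    have hH : g.any (fun s => PySem.Str.isIn "Husband" s) = true := by
      cases hA : g.any (fun s => PySem.Str.isIn "Husband" s) with
      | true => rfl
      | false => rw [(tagNums_isEmpty_iff (by decide)).mpr hA] at hE; cases hE
    simp only [Bool.not_false, Bool.true_and, Bool.not_not]
    rw [Bool.eq_iff_iff, List.all_eq_true, PySem.Set.issubset_iff]
    constructor
    · intro hall c hc
      obtain ⟨w, hw, hW, hlast⟩ := mem_tagNums.mp hc
      have hthis := hall w hw
      rw [hW, hH] at hthis
      simp only [Bool.not_true, Bool.false_or, Bool.or_false] at hthis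
      rw [List.any_eq_true] at hthis
      obtain ⟨h, hhg, hh⟩ := hthis
      rw [Bool.and_eq_true, beq_iff_eq] at hh
      exact mem_tagNums.mpr ⟨h, hhg, hh.1, hh.2.trans hlast⟩
    · intro hsub w hw
      cases hW : PySem.Str.isIn "Wife" w with
      | false => simp
      | true =>
        obtain ⟨c, hc⟩ := last_num_isSome_of_isIn (tag := "Wife") (by decide) hW
        have hcw : c ∈ tagNums "Wife" g := mem_tagNums.mpr ⟨w, hw, hW, hc⟩
        obtain ⟨h, hhg, hh, hhl⟩ := mem_tagNums.mp (hsub c hcw)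
        simp only [Bool.not_true, Bool.false_or, Bool.or_eq_true]
        left
        rw [List.any_eq_true]
        exact ⟨h, hhg, by rw [Bool.and_eq_true, beq_iff_eq]; exact ⟨hh, hhl.trans hc.symm⟩⟩

-- ===== VERDICT (by name: the statement is the Claim_ definition above) =====
theorem check_if_ok_spec : Claim_equal_check_if_ok := by
  intro ns ne nm _
  unfold Spec_check_if_ok check_if_ok check_if_ok_alt
  simp [group_eq]
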